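-- pv_equiv track=rewrite | github.com/kshintani01/007_torihiki_app | tools/compute_shap_all.py | canonical_name_from_transformed
-- ===== SOURCE A (Python) =====
-- def canonical_name_from_transformed(name: str, cat_cols: list[str]) -> str:
--     # ColumnTransformer 命名規則を元に元列へ集約
--     # num: "num__<col>"
--     # cat: "cat__<col>_<category>"（<col> に '_' を含む場合がある → 最長一致）
--     if name.startswith("num__"):
--         return name.split("num__", 1)[1]
--     if name.startswith("cat__"):
--         tail = name.split("cat__", 1)[1]
--         # 最長一致で <col> を見つける
--         matches = [c for c in cat_cols if tail == c or tail.startswith(c + "_")]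
--         if matches:
--             return sorted(matches, key=len, reverse=True)[0]
--         return tail.split("_", 1)[0]
--     return name
-- ===== SOURCE B (Python) =====
-- def canonical_name_from_transformed(name: str, cat_cols: list[str]) -> str:
--     if name.startswith("num__"):
--         return name.split("num__", 1)[1]
--     if name.startswith("cat__"):
--         tail = name.split("cat__", 1)[1]
--         cat_set = set(cat_cols)
--         parts = tail.split("_")
--         # generate candidate column names from the tail itself, longest first
--         for i in range(len(parts), 0, -1):
--             cand = "_".join(parts[:i])
--             if cand in cat_set:
--                 return cand
--         return tail.split("_", 1)[0]
--     return name
-- ===== Notes on version B (the rewrite author's own statement) =====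
-- stated objective: alternative
-- what changed: For cat__ names B generates the candidate prefixes of the tail itself (longest first, via split/join) and probes a set built from cat_cols, instead of scanning cat_cols for prefix matches and sorting the matches by length.
import Mathlib
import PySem

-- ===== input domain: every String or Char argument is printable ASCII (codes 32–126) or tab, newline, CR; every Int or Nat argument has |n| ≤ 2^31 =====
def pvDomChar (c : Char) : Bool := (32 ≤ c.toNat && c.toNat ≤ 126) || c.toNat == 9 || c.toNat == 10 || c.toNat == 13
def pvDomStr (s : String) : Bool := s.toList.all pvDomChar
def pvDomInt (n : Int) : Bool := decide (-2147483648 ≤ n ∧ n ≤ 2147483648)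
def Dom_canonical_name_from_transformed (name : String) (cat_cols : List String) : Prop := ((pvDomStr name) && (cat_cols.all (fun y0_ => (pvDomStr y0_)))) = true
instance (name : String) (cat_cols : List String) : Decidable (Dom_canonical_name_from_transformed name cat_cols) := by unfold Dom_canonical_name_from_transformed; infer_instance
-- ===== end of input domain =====

-- B generates the candidate column names from the tail itself (longest prefix first) and
-- probes a set built from cat_cols, instead of scanning cat_cols and sorting the matches by length.

-- ===== PORT A =====
def canonical_name_from_transformed (name : String) (cat_cols : List String) : String :=
  if PySem.Str.startswith name "num__" then
    -- name.split("num__", 1)[1]: under the startswith guard the split always has a second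
    -- piece, so the .getD defaults below are never used (no IndexError is reachable)
    (PySem.List.pyGet? ((PySem.Str.splitMax? name "num__" 1).getD []) 1).getD name
  else if PySem.Str.startswith name "cat__" then
    let tail := (PySem.List.pyGet? ((PySem.Str.splitMax? name "cat__" 1).getD []) 1).getD name
    let matchesL := cat_cols.filter (fun c => tail == c || PySem.Str.startswith tail (c ++ "_"))
    if !matchesL.isEmpty then
      -- sorted(matches, key=len, reverse=True)[0]: matches is nonempty under the guard
      (PySem.List.pyGet? (PySem.List.sorted matchesL (fun c => PySem.Str.len c) true) 0).getD tail
    else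
      (PySem.List.pyGet? ((PySem.Str.splitMax? tail "_" 1).getD []) 0).getD tail
  else name

-- ===== PORT B =====
-- the loop 'for i in range(len(parts), 0, -1): cand = "_".join(parts[:i]); if cand in cat_set: return cand'
-- of Source B, with i counted down structurally (the Nat argument is Python's i)
def pvAltLoop (cat_set : PySem.Set String) (parts : List String) : Nat → Option String
  | 0 => none
  | i + 1 =>
    let cand := PySem.Str.join "_" (parts.take (i + 1))
    if cat_set.contains cand then some cand else pvAltLoop cat_set parts i

def canonical_name_from_transformed_alt (name : String) (cat_cols : List String) : String :=
  if PySem.Str.startswith name "num__" then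
    (PySem.List.pyGet? ((PySem.Str.splitMax? name "num__" 1).getD []) 1).getD name
  else if PySem.Str.startswith name "cat__" then
    let tail := (PySem.List.pyGet? ((PySem.Str.splitMax? name "cat__" 1).getD []) 1).getD name
    let cat_set := PySem.Set.ofList cat_cols
    let parts := (PySem.Str.split? tail "_").getD []
    match pvAltLoop cat_set parts parts.length with
    | some c => c
    | none => (PySem.List.pyGet? ((PySem.Str.splitMax? tail "_" 1).getD []) 0).getD tail
  else name

-- ===== PRECONDITION & SPEC =====
def Spec_canonical_name_from_transformed (name : String) (cat_cols : List String) (out : String) : Prop := out = canonical_name_from_transformed_alt name cat_cols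
instance (name : String) (cat_cols : List String) (out : String) : Decidable (Spec_canonical_name_from_transformed name cat_cols out) := by unfold Spec_canonical_name_from_transformed; infer_instance

-- ===== CLAIM (what is proved, stated in full; the proofs are below) =====
def Claim_equal_canonical_name_from_transformed : Prop := ∀ (name : String) (cat_cols : List String), Dom_canonical_name_from_transformed name cat_cols → Spec_canonical_name_from_transformed name cat_cols (canonical_name_from_transformed name cat_cols)

-- ===== LEMMAS AND PROOFS =====

-- reference splitter: pvMsp pre t = the pieces of pre ++ t split on '_', where '_' ∉ pre
def pvMsp (pre : List Char) : List Char → List (List Char)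
  | [] => [pre]
  | c :: rest => if c = '_' then pre :: pvMsp [] rest else pvMsp (pre ++ [c]) rest

lemma pvMsp_ne_nil (pre : List Char) (t : List Char) : pvMsp pre t ≠ [] := by
  induction t generalizing pre with
  | nil => simp [pvMsp]
  | cons c rest ih => by_cases hc : c = '_' <;> simp [pvMsp, hc, ih]

lemma pv_go_eq (l : List Char) : ∀ (fuel : Nat) (cur : List Char) (acc : List (List Char)),
    l.length < fuel →
    PySem.Chars.splitOn.go ['_'] fuel l cur acc = acc.reverse ++ pvMsp cur.reverse l := by
  induction l with
  | nil =>
    intro fuel cur acc h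
    match fuel, h with
    | f + 1, _ => rw [PySem.Chars.splitOn.go.eq_def]; simp [pvMsp]
  | cons c rest ih =>
    intro fuel cur acc h
    match fuel, h with
    | f + 1, h =>
      rw [PySem.Chars.splitOn.go.eq_def]
      by_cases hc : c = '_'
      · subst hc
        simp only [List.isPrefixOf, beq_self_eq_true, Bool.true_and, if_pos]
        have hdrop : List.drop ['_'].length ('_' :: rest) = rest := rfl
        rw [hdrop, ih f [] (cur.reverse :: acc) (by simpa using h)]
        simp [pvMsp]
      · have hpre : (['_'].isPrefixOf (c :: rest)) = false := by
          simp [List.isPrefixOf_cons₂]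
          intro hcc
          exact absurd hcc.symm hc
        simp only [hpre, Bool.false_eq_true, if_false]
        rw [ih f (c :: cur) acc (by simpa using h)]
        simp [pvMsp, hc]

lemma pv_splitOn_eq (t : List Char) : PySem.Chars.splitOn t ['_'] = pvMsp [] t := by
  unfold PySem.Chars.splitOn
  rw [pv_go_eq t (t.length + 1) [] [] (by omega)]
  simp

lemma pvJ_append_singleton (xs : List (List Char)) (y : List Char) (h : xs ≠ []) :
    PySem.Chars.join ['_'] (xs ++ [y]) = PySem.Chars.join ['_'] xs ++ '_' :: y := by
  induction xs with
  | nil => exact absurd rfl h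
  | cons a l ih =>
    cases l with
    | nil => simp [PySem.Chars.join_cons_cons, PySem.Chars.join_singleton]
    | cons b m =>
      have hh := ih (by simp)
      simp only [List.cons_append] at hh ⊢
      rw [PySem.Chars.join_cons_cons, PySem.Chars.join_cons_cons, hh]
      simp

lemma pv_decomp (pre rest c : List Char) (hpre : '_' ∉ pre) :
    (c = pre ++ '_' :: rest ∨ (c ++ ['_']) <+: pre ++ '_' :: rest) ↔
    (c = pre ∨ ∃ c', c = pre ++ '_' :: c' ∧ (c' = rest ∨ (c' ++ ['_']) <+: rest)) := by
  constructor
  · rintro (rfl | hw)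
    · exact Or.inr ⟨rest, rfl, Or.inl rfl⟩
    · have hlen : pre.length ≤ c.length := by
        by_contra hlt
        rw [Nat.not_le] at hlt
        have hcp : c ++ ['_'] <+: pre :=
          List.prefix_of_prefix_length_le hw (List.prefix_append pre ('_' :: rest))
            (by simp; omega)
        have h' : ('_' : Char) ∈ pre := hcp.subset (by simp)
        exact hpre h'
      have hcw : c <+: pre ++ '_' :: rest := (List.prefix_append c ['_']).trans hw
      rcases Nat.eq_or_lt_of_le hlen with heq | hlt
      · left
        have hcp : c <+: pre :=
          List.prefix_of_prefix_length_le hcw (List.prefix_append pre ('_' :: rest)) (by omega)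
        exact hcp.eq_of_length heq.symm
      · right
        have hpc : pre <+: c :=
          List.prefix_of_prefix_length_le (List.prefix_append pre ('_' :: rest)) hcw
            (le_of_lt hlt)
        obtain ⟨d, rfl⟩ := hpc
        have hd : d ++ ['_'] <+: '_' :: rest := by
          have h2 := hw
          rw [List.append_assoc] at h2
          exact (List.prefix_append_right_inj pre).mp h2
        cases d with
        | nil => simp at hlt
        | cons x d2 =>
          rw [List.cons_append] at hd
          obtain ⟨hx, h2⟩ := List.cons_prefix_cons.mp hd
          subst hx
          exact ⟨d2, rfl, Or.inr h2⟩
  · rintro (rfl | ⟨c', rfl, (rfl | hp)⟩)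
    · right
      exact (List.prefix_append_right_inj _).mpr ⟨rest, by simp⟩
    · left; rfl
    · right
      have h3 : (pre ++ '_' :: c') ++ ['_'] = pre ++ '_' :: (c' ++ ['_']) := by simp
      rw [h3]
      exact (List.prefix_append_right_inj pre).mpr (List.cons_prefix_cons.mpr ⟨rfl, hp⟩)

lemma pv_take_cons_join (pre : List Char) (M : List (List Char)) (j : Nat) (hj : 1 ≤ j)
    (hM : M ≠ []) :
    PySem.Chars.join ['_'] ((pre :: M).take (j + 1)) =
      pre ++ '_' :: PySem.Chars.join ['_'] (M.take j) := by
  rw [List.take_succ_cons]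
  cases htj : M.take j with
  | nil =>
    rcases List.take_eq_nil_iff.mp htj with h | h
    · omega
    · exact absurd h hM
  | cons a l =>
    rw [PySem.Chars.join_cons_cons]
    simp

lemma pv_main (t : List Char) : ∀ (pre c : List Char), '_' ∉ pre →
    ((c = pre ++ t ∨ (c ++ ['_']) <+: pre ++ t) ↔
      ∃ i, 1 ≤ i ∧ i ≤ (pvMsp pre t).length ∧
        c = PySem.Chars.join ['_'] ((pvMsp pre t).take i)) := by
  induction t with
  | nil =>
    intro pre c hpre
    constructor
    · rintro (rfl | hp)
      · exact ⟨1, le_refl 1, by simp [pvMsp], by simp [pvMsp, PySem.Chars.join_singleton]⟩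
      · simp only [List.append_nil] at hp
        have h' : ('_' : Char) ∈ pre := hp.subset (by simp)
        exact absurd h' hpre
    · rintro ⟨i, h1, h2, hc⟩
      simp only [pvMsp, List.length_cons, List.length_nil] at h2
      have hi : i = 1 := by omega
      subst hi
      left
      simpa [pvMsp, PySem.Chars.join_singleton] using hc
  | cons c0 rest ih =>
    intro pre c hpre
    by_cases hc0 : c0 = '_'
    case neg =>
      have h1 : pvMsp pre (c0 :: rest) = pvMsp (pre ++ [c0]) rest := by simp [pvMsp, hc0]
      have h2 : pre ++ c0 :: rest = (pre ++ [c0]) ++ rest := by simp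
      rw [h1, h2]
      refine ih (pre ++ [c0]) c ?_
      simp only [List.mem_append, List.mem_singleton]
      rintro (h | h)
      · exact hpre h
      · exact hc0 h.symm
    case pos =>
      subst hc0
      have hM : pvMsp pre ('_' :: rest) = pre :: pvMsp [] rest := by simp [pvMsp]
      have hMne : pvMsp [] rest ≠ [] := pvMsp_ne_nil [] rest
      rw [hM]
      constructor
      · intro h
        rcases (pv_decomp pre rest c hpre).mp h with rfl | ⟨c', rfl, hc'⟩
        · exact ⟨1, le_refl 1, by simp, by simp [PySem.Chars.join_singleton]⟩
        · rcases (ih [] c' (by simp)).mp (by simpa using hc') with ⟨j, hj1, hj2, hcj⟩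
          refine ⟨j + 1, by omega, by simp; omega, ?_⟩
          rw [pv_take_cons_join pre _ j hj1 hMne, ← hcj]
      · rintro ⟨i, h1, h2, hc⟩
        refine (pv_decomp pre rest c hpre).mpr ?_
        match i, h1 with
        | 1, _ =>
          left
          simpa [PySem.Chars.join_singleton] using hc
        | (j + 2), _ =>
          right
          have hj1 : 1 ≤ j + 1 := by omega
          have hj2 : j + 1 ≤ (pvMsp [] rest).length := by
            simp only [List.length_cons] at h2; omega
          rw [pv_take_cons_join pre _ (j + 1) hj1 hMne] at hc
          refine ⟨PySem.Chars.join ['_'] ((pvMsp [] rest).take (j + 1)), hc, ?_⟩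
          have := (ih [] (PySem.Chars.join ['_'] ((pvMsp [] rest).take (j + 1))) (by simp)).mpr
            ⟨j + 1, hj1, hj2, rfl⟩
          simpa using this

lemma pv_len_lt (ps : List (List Char)) (i : Nat) (h1 : 1 ≤ i) (h2 : i < ps.length) :
    (PySem.Chars.join ['_'] (ps.take i)).length < (PySem.Chars.join ['_'] (ps.take (i + 1))).length := by
  have hne : ps.take i ≠ [] := by
    intro h
    rcases List.take_eq_nil_iff.mp h with h' | h'
    · omega
    · subst h'; simp at h2
  have ht : ps.take (i + 1) = ps.take i ++ [ps[i]] := by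
    rw [List.take_add_one, List.getElem?_eq_getElem h2]
    rfl
  rw [ht, pvJ_append_singleton _ _ hne]
  simp

lemma pv_len_mono (ps : List (List Char)) (i j : Nat) (h1 : 1 ≤ i) (hij : i < j) (hj : j ≤ ps.length) :
    (PySem.Chars.join ['_'] (ps.take i)).length < (PySem.Chars.join ['_'] (ps.take j)).length := by
  induction j with
  | zero => omega
  | succ k ihk =>
    rcases Nat.lt_or_ge i k with hik | hik
    · exact lt_trans (ihk hik (by omega)) (pv_len_lt ps k (by omega) (by omega))
    · have hik' : i = k := by omega
      subst hik'
      exact pv_len_lt ps i h1 (by omega)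

lemma pvAltLoop_spec (cc : List String) (parts : List String) : ∀ k : Nat,
    (pvAltLoop (PySem.Set.ofList cc) parts k = none ↔
      ∀ i, 1 ≤ i → i ≤ k → PySem.Str.join "_" (parts.take i) ∉ cc) ∧
    (∀ m, pvAltLoop (PySem.Set.ofList cc) parts k = some m →
      ∃ i, 1 ≤ i ∧ i ≤ k ∧ m = PySem.Str.join "_" (parts.take i) ∧ m ∈ cc ∧
        ∀ j, i < j → j ≤ k → PySem.Str.join "_" (parts.take j) ∉ cc) := by
  intro k
  induction k with
  | zero =>
    refine ⟨⟨fun _ i hi1 hi0 => by omega, fun _ => rfl⟩, ?_⟩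
    intro m hm
    simp [pvAltLoop] at hm
  | succ k ihk =>
    obtain ⟨ihnone, ihsome⟩ := ihk
    by_cases hmem : PySem.Str.join "_" (parts.take (k + 1)) ∈ cc
    · have hcon : (PySem.Set.ofList cc).contains (PySem.Str.join "_" (parts.take (k + 1))) = true := by
        exact (PySem.Set.contains_iff _ _).mpr ((PySem.Set.mem_ofList cc _).mpr hmem)
      refine ⟨⟨?_, ?_⟩, ?_⟩
      · intro h
        simp only [pvAltLoop, hcon, if_true] at h
        exact absurd h (by simp)
      · intro h
        exact absurd hmem (h (k + 1) (by omega) (le_refl _))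
      · intro m hm
        simp only [pvAltLoop, hcon, if_true] at hm
        injection hm with hm'
        subst hm'
        exact ⟨k + 1, by omega, le_refl _, rfl, hmem, fun j hj1 hj2 => by omega⟩
    · have hcon : (PySem.Set.ofList cc).contains (PySem.Str.join "_" (parts.take (k + 1))) = false := by
        rw [Bool.eq_false_iff]
        intro h
        exact hmem ((PySem.Set.mem_ofList cc _).mp ((PySem.Set.contains_iff _ _).mp h))
      have hstep : pvAltLoop (PySem.Set.ofList cc) parts (k + 1) =
          pvAltLoop (PySem.Set.ofList cc) parts k := by
        simp only [pvAltLoop, hcon]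
        simp
      refine ⟨⟨?_, ?_⟩, ?_⟩
      · intro h i hi1 hi2
        rw [hstep, ihnone] at h
        rcases Nat.lt_or_ge i (k + 1) with hik | hik
        · exact h i hi1 (by omega)
        · have : i = k + 1 := by omega
          subst this
          exact hmem
      · intro h
        rw [hstep, ihnone]
        intro i hi1 hi2
        exact h i hi1 (by omega)
      · intro m hm
        rw [hstep] at hm
        obtain ⟨i, hi1, hi2, hmeq, hmcc, hmax⟩ := ihsome m hm
        refine ⟨i, hi1, by omega, hmeq, hmcc, ?_⟩
        intro j hj1 hj2
        rcases Nat.lt_or_ge j (k + 1) with hjk | hjk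
        · exact hmax j hj1 (by omega)
        · have : j = k + 1 := by omega
          subst this
          exact hmem

lemma pv_cat_branch (t fb : String) (cc : List String) :
    (if !(cc.filter (fun c => t == c || PySem.Str.startswith t (c ++ "_"))).isEmpty then
       (PySem.List.pyGet? (PySem.List.sorted (cc.filter (fun c => t == c || PySem.Str.startswith t (c ++ "_"))) (fun c => PySem.Str.len c) true) 0).getD t
     else fb) =
    (match pvAltLoop (PySem.Set.ofList cc) ((PySem.Str.split? t "_").getD []) ((PySem.Str.split? t "_").getD []).length with
     | some c => c
     | none => fb) := by
  obtain ⟨ps, hps, hmap⟩ : ∃ ps, PySem.Str.split? t "_" = some ps ∧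
      ps.map String.toList = pvMsp [] t.toList := by
    have h := PySem.Str.split?_map t "_"
    rw [show ("_" : String).toList = ['_'] from rfl] at h
    rw [show PySem.Chars.split? t.toList ['_'] =
      some (PySem.Chars.splitOn t.toList ['_']) from rfl] at h
    cases hs : PySem.Str.split? t "_" with
    | none => rw [hs] at h; simp at h
    | some ps =>
      rw [hs] at h
      simp only [Option.map_some] at h
      injection h with h'
      exact ⟨ps, rfl, by rw [h', pv_splitOn_eq]⟩
  rw [hps]
  simp only [Option.getD_some]
  set M := cc.filter (fun c => t == c || PySem.Str.startswith t (c ++ "_")) with hMdef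
  set n := ps.length with hn
  have hlen : (pvMsp [] t.toList).length = n := by rw [← hmap, List.length_map]
  have hcand : ∀ i : Nat, (PySem.Str.join "_" (ps.take i)).toList =
      PySem.Chars.join ['_'] ((pvMsp [] t.toList).take i) := by
    intro i
    rw [PySem.Str.toList_join, show ("_" : String).toList = ['_'] from rfl, ← hmap,
      List.map_take]
  have hP : ∀ c : String, ((t == c || PySem.Str.startswith t (c ++ "_")) = true) ↔
      ∃ i, 1 ≤ i ∧ i ≤ n ∧ c = PySem.Str.join "_" (ps.take i) := by
    intro c
    have hm := pv_main t.toList [] c.toList (by simp)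
    simp only [List.nil_append] at hm
    constructor
    · intro hb
      have hor : c.toList = t.toList ∨ (c.toList ++ ['_']) <+: t.toList := by
        rcases Bool.or_eq_true_iff.mp hb with hb | hb
        · left
          rw [beq_iff_eq.mp hb]
        · right
          rw [PySem.Str.startswith_eq] at hb
          have hb' := (PySem.Chars.startswith_iff _ _).mp hb
          rwa [String.toList_append, show ("_" : String).toList = ['_'] from rfl] at hb'
      obtain ⟨i, h1, h2, hc⟩ := hm.mp hor
      refine ⟨i, h1, by omega, ?_⟩
      apply String.toList_inj.mp
      rw [hc, hcand i]
    · rintro ⟨i, h1, h2, rfl⟩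
      have hor := hm.mpr ⟨i, h1, by omega, (hcand i)⟩
      rcases hor with heq | hp
      · have ht' : t = PySem.Str.join "_" (ps.take i) := String.toList_inj.mp heq.symm
        simp [← ht']
      · apply Bool.or_eq_true_iff.mpr
        right
        rw [PySem.Str.startswith_eq]
        apply (PySem.Chars.startswith_iff _ _).mpr
        rw [String.toList_append, show ("_" : String).toList = ['_'] from rfl]
        exact hp
  obtain ⟨alnone, alsome⟩ := pvAltLoop_spec cc ps n
  by_cases hemp : M = []
  · have hal : pvAltLoop (PySem.Set.ofList cc) ps n = none := by
      apply alnone.mpr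
      intro i hi1 hi2 hmem
      have hPi := (hP (PySem.Str.join "_" (ps.take i))).mpr ⟨i, hi1, hi2, rfl⟩
      have hin : PySem.Str.join "_" (ps.take i) ∈ M := by
        rw [hMdef]
        exact List.mem_filter.mpr ⟨hmem, hPi⟩
      rw [hemp] at hin
      simp at hin
    rw [hal, hemp]
    simp
  · cases hal : pvAltLoop (PySem.Set.ofList cc) ps n with
    | none =>
      exfalso
      obtain ⟨c0, hc0⟩ := List.exists_mem_of_ne_nil M hemp
      obtain ⟨hc0cc, hc0P⟩ := List.mem_filter.mp hc0
      obtain ⟨i0, hi01, hi02, rfl⟩ := (hP c0).mp hc0P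
      exact (alnone.mp hal) i0 hi01 hi02 hc0cc
    | some m' =>
      obtain ⟨i', hi'1, hi'2, hm'eq, hm'cc, hmax⟩ := alsome m' hal
      cases hS : PySem.List.sorted M (fun c => PySem.Str.len c) true with
      | nil => exact absurd ((PySem.List.sorted_eq_nil_iff _ _ _).mp hS) hemp
      | cons m rest =>
        have hcondition : (!M.isEmpty) = true := by
          cases hME : M with
          | nil => exact absurd hME hemp
          | cons a l => simp
        rw [if_pos hcondition]
        have hmm : m ∈ M := (PySem.List.mem_sorted M _ true m).mp (hS ▸ List.mem_cons_self)
        obtain ⟨hmcc, hmP⟩ := List.mem_filter.mp hmm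
        obtain ⟨im, him1, him2, hmeq⟩ := (hP m).mp hmP
        have him_le : im ≤ i' := by
          by_contra hgt
          rw [Nat.not_le] at hgt
          exact (hmax im hgt him2) (hmeq ▸ hmcc)
        have hi'_le : i' ≤ im := by
          by_contra hgt
          rw [Nat.not_le] at hgt
          have hmem' : m' ∈ M :=
            List.mem_filter.mpr ⟨hm'cc, (hP m').mpr ⟨i', hi'1, hi'2, hm'eq⟩⟩
          have hkey := PySem.List.key_head_sorted_rev_ge M (fun c => PySem.Str.len c) hS m' hmem'
          have hlt := pv_len_mono (pvMsp [] t.toList) im i' him1 hgt (by omega)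
          simp only [PySem.Str.len_eq] at hkey
          have e1 : m.toList.length = (PySem.Chars.join ['_'] ((pvMsp [] t.toList).take im)).length := by
            rw [hmeq, hcand]
          have e2 : m'.toList.length = (PySem.Chars.join ['_'] ((pvMsp [] t.toList).take i')).length := by
            rw [hm'eq, hcand]
          omega
        have hii : im = i' := le_antisymm him_le hi'_le
        subst hii
        have hmm' : m = m' := by rw [hmeq, hm'eq]
        have hg : PySem.List.pyGet? (m :: rest) (0 : Int) = some m := by
          rw [show (0 : Int) = ((0 : Nat) : Int) by simp, PySem.List.pyGet?_natCast]
          rfl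
        rw [hg]
        simpa using hmm'

-- ===== VERDICT (by name: the statement is the Claim_ definition above) =====
theorem canonical_name_from_transformed_spec : Claim_equal_canonical_name_from_transformed := by
  intro name cat_cols _
  unfold Spec_canonical_name_from_transformed
  simp only [canonical_name_from_transformed, canonical_name_from_transformed_alt]
  by_cases h1 : PySem.Str.startswith name "num__" = true
  · rw [if_pos h1, if_pos h1]
  · rw [if_neg h1, if_neg h1]
    by_cases h2 : PySem.Str.startswith name "cat__" = true
    · rw [if_pos h2, if_pos h2]
      exact (pv_cat_branch
        ((PySem.List.pyGet? ((PySem.Str.splitMax? name "cat__" 1).getD []) 1).getD name)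
        ((PySem.List.pyGet? ((PySem.Str.splitMax?
            ((PySem.List.pyGet? ((PySem.Str.splitMax? name "cat__" 1).getD []) 1).getD name) "_" 1).getD []) 0).getD
          ((PySem.List.pyGet? ((PySem.Str.splitMax? name "cat__" 1).getD []) 1).getD name))
        cat_cols)
    · rw [if_neg h2, if_neg h2]
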